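-- pv_equiv track=rewrite | github.com/poornachandran2006/5G_Digital_Twin | kpi/data_generator.py | _build_injection_set
-- ===== SOURCE A (Python) =====
-- def _build_injection_set(
--     intervals: list[tuple[int, int, int]],
-- ) -> dict[int, tuple[int, ...]]:
--     """
--     Build a tick → (gnb_ids…) lookup for fast interval membership test.
--
--     Args:
--         intervals: List of ``(start, end, gnb_id)`` injection intervals.
--
--     Returns:
--         dict mapping each injected tick to a tuple of affected gNB IDs.
--     """
--     inject: dict[int, list[int]] = {}
--     for start, end, gid in intervals:
--         for t in range(start, end + 1):
--             inject.setdefault(t, []).append(gid)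
--     return {t: tuple(gids) for t, gids in inject.items()}
-- ===== SOURCE B (Python) =====
-- def _build_injection_set(
--     intervals: list[tuple[int, int, int]],
-- ) -> dict[int, tuple[int, ...]]:
--     # First pass: collect the distinct injected ticks in first-occurrence order.
--     ticks: list[int] = []
--     seen: set[int] = set()
--     for start, end, gid in intervals:
--         for t in range(start, end + 1):
--             if t not in seen:
--                 seen.add(t)
--                 ticks.append(t)
--     # Second pass: for each tick, the affected gids are read off the intervals directly.
--     return {t: tuple(g for s, e, g in intervals if s <= t <= e) for t in ticks}
-- ===== Notes on version B (the rewrite author's own statement) =====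
-- stated objective: alternative
-- what changed: A scatters gids into a dict of growing lists in one nested loop; B instead collects the distinct ticks in first-occurrence order in a first pass and then computes each tick's gid tuple directly by scanning the intervals for membership, so no grouping dict of lists is ever built.
import Mathlib
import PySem

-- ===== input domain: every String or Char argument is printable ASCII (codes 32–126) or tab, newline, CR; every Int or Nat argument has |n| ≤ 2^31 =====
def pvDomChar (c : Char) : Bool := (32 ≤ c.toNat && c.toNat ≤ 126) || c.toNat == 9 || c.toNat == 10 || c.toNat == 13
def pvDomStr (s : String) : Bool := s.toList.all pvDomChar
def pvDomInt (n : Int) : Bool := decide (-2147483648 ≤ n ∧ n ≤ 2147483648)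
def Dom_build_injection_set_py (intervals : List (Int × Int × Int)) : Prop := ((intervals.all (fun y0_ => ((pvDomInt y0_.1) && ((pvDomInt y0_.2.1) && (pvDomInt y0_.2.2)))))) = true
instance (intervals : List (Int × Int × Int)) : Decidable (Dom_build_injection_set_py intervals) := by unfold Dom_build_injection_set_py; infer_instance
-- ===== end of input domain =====

-- B replaces A's scatter-into-dict-of-lists by two passes: collect the distinct ticks in
-- first-occurrence order, then read each tick's gid tuple directly off the intervals
-- (objective: alternative — no grouping dict at all, values recomputed by interval scan).

-- ===== PORT A =====
-- inject.setdefault(t, []).append(gid) sets inject[t] = inject.get(t, []) + [gid]: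
-- exactly PySem.Dict.modify t [] (· ++ [gid]).
def build_injection_set_py (intervals : List (Int × Int × Int)) : List (Int × List Int) :=
  let inject : PySem.Dict Int (List Int) :=
    intervals.foldl (fun d iv =>
      (PySem.List.pyRange iv.1 (iv.2.1 + 1)).foldl
        (fun d t => d.modify t [] (fun gids => gids ++ [iv.2.2])) d)
      PySem.Dict.empty
  -- {t: tuple(gids) for t, gids in inject.items()}
  inject.items.map (fun p => (p.1, p.2))

-- ===== PORT B =====
def build_injection_set_py_alt (intervals : List (Int × Int × Int)) : List (Int × List Int) :=
  -- first pass: distinct ticks in first-occurrence order (seen : set, ticks : list)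
  let st : PySem.Set Int × List Int :=
    intervals.foldl (fun st iv =>
      (PySem.List.pyRange iv.1 (iv.2.1 + 1)).foldl
        (fun st t => if st.1.contains t then st else (st.1.add t, st.2 ++ [t])) st)
      (PySem.Set.empty, [])
  -- second pass: {t: tuple(g for s, e, g in intervals if s <= t <= e) for t in ticks}
  st.2.map (fun t =>
    (t, (intervals.filter (fun iv => decide (iv.1 ≤ t) && decide (t ≤ iv.2.1))).map (fun iv => iv.2.2)))

-- ===== PRECONDITION & SPEC =====
def Spec_build_injection_set_py (intervals : List (Int × Int × Int)) (out : List (Int × List Int)) : Prop := out = build_injection_set_py_alt intervals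
instance (intervals : List (Int × Int × Int)) (out : List (Int × List Int)) : Decidable (Spec_build_injection_set_py intervals out) := by unfold Spec_build_injection_set_py; infer_instance

-- ===== CLAIM (what is proved, stated in full; the proofs are below) =====
def Claim_equal_build_injection_set_py : Prop := ∀ (intervals : List (Int × Int × Int)), Dom_build_injection_set_py intervals → Spec_build_injection_set_py intervals (build_injection_set_py intervals)

-- ===== LEMMAS AND PROOFS =====

-- the flattened (tick, gid) pair stream A scatters into its dict
def pvPairs (intervals : List (Int × Int × Int)) : List (Int × Int) :=
  intervals.flatMap (fun iv => (PySem.List.pyRange iv.1 (iv.2.1 + 1)).map (fun t => (t, iv.2.2)))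

-- the flattened tick stream (keys in first-occurrence order after dedup)
def pvTicks (intervals : List (Int × Int × Int)) : List Int :=
  intervals.flatMap (fun iv => PySem.List.pyRange iv.1 (iv.2.1 + 1))

theorem pvPairs_fst (intervals : List (Int × Int × Int)) :
    (pvPairs intervals).map Prod.fst = pvTicks intervals := by
  simp [pvPairs, pvTicks, List.map_flatMap, Function.comp_def]

-- A's nested loop is the pair-stream fold of the grouping step
theorem pvA_fold (intervals : List (Int × Int × Int)) :
    intervals.foldl (fun d iv =>
      (PySem.List.pyRange iv.1 (iv.2.1 + 1)).foldl
        (fun d t => d.modify t [] (fun gids => gids ++ [iv.2.2])) d)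
      PySem.Dict.empty
    = (pvPairs intervals).foldl (fun d p => d.modify p.1 [] (fun gids => gids ++ [p.2]))
        PySem.Dict.empty := by
  rw [pvPairs, List.foldl_flatMap]
  simp only [List.foldl_map]

-- B's first pass: both components equal the dedup (in first-occurrence order) of the tick stream
theorem pvB_step (xs : List Int) (s : PySem.Set Int) :
    xs.foldl (fun st t => if st.1.contains t then st else (st.1.add t, st.2 ++ [t])) (s, (s : List Int))
    = (xs.foldl (fun s t => s.add t) s, xs.foldl (fun s t => s.add t) s) := by
  induction xs generalizing s with
  | nil => rfl
  | cons x xs ih =>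
      have hstep : (if s.contains x = true then (s, (s : List Int)) else (s.add x, (s : List Int) ++ [x]))
          = (s.add x, (s.add x : List Int)) := by
        by_cases h : x ∈ s
        · rw [if_pos ((PySem.Set.contains_iff s x).2 h), PySem.Set.add_of_mem h]
        · rw [if_neg (fun hc => h ((PySem.Set.contains_iff s x).1 hc)), PySem.Set.add_of_not_mem h]
      rw [List.foldl_cons]
      have hrec := ih (s.add x)
      rw [← hstep] at hrec
      exact hrec

theorem pvB_fold (intervals : List (Int × Int × Int)) :
    intervals.foldl (fun st iv =>
      (PySem.List.pyRange iv.1 (iv.2.1 + 1)).foldl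
        (fun st t => if st.1.contains t then st else (st.1.add t, st.2 ++ [t])) st)
      (PySem.Set.empty, [])
    = (PySem.Set.ofList (pvTicks intervals), PySem.Set.ofList (pvTicks intervals)) := by
  have h1 : intervals.foldl (fun st iv =>
      (PySem.List.pyRange iv.1 (iv.2.1 + 1)).foldl
        (fun st t => if st.1.contains t then st else (st.1.add t, st.2 ++ [t])) st)
      (PySem.Set.empty, [])
      = (pvTicks intervals).foldl
          (fun st t => if st.1.contains t then st else (st.1.add t, st.2 ++ [t]))
          (PySem.Set.empty, []) := by
    rw [pvTicks, List.foldl_flatMap]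
  have h2 : (pvTicks intervals).foldl (fun s t => s.add t) PySem.Set.empty
      = PySem.Set.ofList (pvTicks intervals) := by
    have := PySem.Set.update_map_eq_foldl_add (pvTicks intervals) id PySem.Set.empty
    simpa [PySem.Set.update_empty] using this.symm
  have h0 : (PySem.Set.empty, ([] : List Int)) = ((PySem.Set.empty : PySem.Set Int), ((PySem.Set.empty : PySem.Set Int) : List Int)) := rfl
  rw [h1, h0, pvB_step, h2]

-- per-tick values: A's accumulated gid list is B's interval scan
theorem pvVals (intervals : List (Int × Int × Int)) (t : Int) :
    ((pvPairs intervals).filter (fun p => p.1 == t)).map (fun p => p.2)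
    = (intervals.filter (fun iv => decide (iv.1 ≤ t) && decide (t ≤ iv.2.1))).map (fun iv => iv.2.2) := by
  induction intervals with
  | nil => rfl
  | cons iv ivs ih =>
      rw [pvPairs, List.flatMap_cons, ← pvPairs, List.filter_append, List.map_append, ih]
      have hhead : (((PySem.List.pyRange iv.1 (iv.2.1 + 1)).map (fun t' => (t', iv.2.2))).filter
            (fun p => p.1 == t)).map (fun p => p.2)
          = if iv.1 ≤ t ∧ t ≤ iv.2.1 then [iv.2.2] else [] := by
        rw [List.filter_map, List.map_map]
        have hf : ((fun p : Int × Int => p.1 == t) ∘ fun t' => (t', iv.2.2)) = fun t' => t' == t := rfl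
        have hg : ((fun p : Int × Int => p.2) ∘ fun t' => (t', iv.2.2)) = fun _ => iv.2.2 := rfl
        rw [hf, hg, List.filter_beq]
        by_cases h : iv.1 ≤ t ∧ t ≤ iv.2.1
        · have hmem : t ∈ PySem.List.pyRange iv.1 (iv.2.1 + 1) :=
            PySem.List.mem_pyRange_one.2 ⟨h.1, by omega⟩
          have hcount : (PySem.List.pyRange iv.1 (iv.2.1 + 1)).count t = 1 :=
            List.count_eq_one_of_mem (PySem.List.nodup_pyRange_one _ _) hmem
          simp [hcount, h]
        · have hmem : t ∉ PySem.List.pyRange iv.1 (iv.2.1 + 1) := by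
            intro hm
            exact h ⟨(PySem.List.mem_pyRange_one.1 hm).1, by
              have := (PySem.List.mem_pyRange_one.1 hm).2; omega⟩
          have hcount : (PySem.List.pyRange iv.1 (iv.2.1 + 1)).count t = 0 :=
            List.count_eq_zero_of_not_mem hmem
          simp [hcount, h]
      rw [hhead]
      by_cases h : iv.1 ≤ t ∧ t ≤ iv.2.1
      · simp [h.1, h.2]
      · have : (decide (iv.1 ≤ t) && decide (t ≤ iv.2.1)) = false := by
          rcases not_and_or.1 h with h' | h' <;> simp [h']
        simp [this, h]

theorem pvMain (intervals : List (Int × Int × Int)) :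
    build_injection_set_py intervals = build_injection_set_py_alt intervals := by
  rw [build_injection_set_py, build_injection_set_py_alt, pvA_fold, pvB_fold]
  have hnodup : ((pvPairs intervals).foldl
      (fun d p => d.modify p.1 [] (fun gids => gids ++ [p.2])) PySem.Dict.empty).keys.Nodup := by
    have := PySem.Dict.nodup_keys_foldl_modify_key (pvPairs intervals) Prod.fst []
      (fun _ p gids => gids ++ [p.2]) PySem.Dict.empty (by simp [PySem.Dict.keys_empty])
    exact this
  have hkeys : ((pvPairs intervals).foldl
      (fun d p => d.modify p.1 [] (fun gids => gids ++ [p.2])) PySem.Dict.empty).keys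
      = PySem.Set.ofList (pvTicks intervals) := by
    have := PySem.Dict.keys_foldl_modify_key (pvPairs intervals) Prod.fst []
      (fun _ p gids => gids ++ [p.2]) PySem.Dict.empty
    rw [this, PySem.Dict.keys_empty, pvPairs_fst]
    exact PySem.Set.update_empty _
  rw [PySem.Dict.items_eq_map_keys _ hnodup [], hkeys, List.map_map]
  refine List.map_congr_left (fun t _ => ?_)
  have hget := PySem.Dict.getD_foldl_modify_append (pvPairs intervals) PySem.Dict.empty t
  simp only [Function.comp]
  rw [hget]
  simp [pvVals intervals t]

-- ===== VERDICT (by name: the statement is the Claim_ definition above) =====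
theorem build_injection_set_py_spec : Claim_equal_build_injection_set_py := by
  intro intervals _
  exact pvMain intervals
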